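-- pv_equiv track=rewrite | github.com/eateren/advent-of-code-2020 | 6/aoc2020-6.py | countY2
-- ===== SOURCE A (Python) =====
-- def countY2(data):
--
--     sum = 0
--     ABC = "abcdefghijklmnopqrstuvwxyz"
--
--     for newList in data:
--
--         for x in ABC:
--
--             itemCount = len(newList)
--             itemYcount = 0
--             for item in newList:
--
--                 if x in item:
--
--                     itemYcount +=1
--
--             if itemYcount == itemCount:
--                 sum += 1
--
--     return sum
-- ===== SOURCE B (Python) =====
-- def countY2(data):
--     ABC = set("abcdefghijklmnopqrstuvwxyz")
--     total = 0
--     for group in data: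
--         common = ABC
--         for line in group:
--             common = common & set(line)
--         total += len(common)
--     return total
-- ===== Notes on version B (the rewrite author's own statement) =====
-- stated objective: faster
-- what changed: B folds set intersection of the lines' character sets (seeded with the alphabet set) per group and sums the intersection sizes, instead of A's loop over all 26 letters with an inner substring scan counting the lines containing each letter.
import Mathlib
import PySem

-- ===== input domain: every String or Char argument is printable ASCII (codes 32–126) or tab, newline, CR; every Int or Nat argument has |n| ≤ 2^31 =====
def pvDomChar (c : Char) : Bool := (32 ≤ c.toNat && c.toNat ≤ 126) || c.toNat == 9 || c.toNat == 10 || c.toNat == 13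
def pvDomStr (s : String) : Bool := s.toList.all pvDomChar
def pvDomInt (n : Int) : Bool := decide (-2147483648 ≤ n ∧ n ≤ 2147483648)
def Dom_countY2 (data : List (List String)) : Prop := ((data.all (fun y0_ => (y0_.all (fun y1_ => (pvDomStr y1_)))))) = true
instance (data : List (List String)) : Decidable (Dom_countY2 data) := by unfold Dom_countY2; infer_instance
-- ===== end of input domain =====

-- B replaces A's 26-letter × lines counting loops by a per-group set-intersection fold (simpler/idiomatic); same return value.

-- ===== PORT A =====
def countY2 (data : List (List String)) : Int :=
  data.foldl (fun sum newList =>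
    ("abcdefghijklmnopqrstuvwxyz".toList).foldl (fun sum x =>
      let itemCount : Int := (newList.length : Int)
      let itemYcount : Int :=
        newList.foldl (fun c item => if PySem.Chars.isIn [x] item.toList then c + 1 else c) 0
      if itemYcount = itemCount then sum + 1 else sum) sum) 0

-- ===== PORT B =====
def pvABCset : PySem.Set Char := PySem.Set.ofList "abcdefghijklmnopqrstuvwxyz".toList

def countY2_alt (data : List (List String)) : Int :=
  data.foldl (fun total group =>
    total +
      PySem.Set.len
        (group.foldl (fun common line => PySem.Set.inter common (PySem.Set.ofList line.toList))
          pvABCset)) 0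

-- ===== PRECONDITION & SPEC =====
def Spec_countY2 (data : List (List String)) (out : Int) : Prop := out = countY2_alt data
instance (data : List (List String)) (out : Int) : Decidable (Spec_countY2 data out) := by unfold Spec_countY2; infer_instance

-- ===== CLAIM (what is proved, stated in full; the proofs are below) =====
def Claim_equal_countY2 : Prop := ∀ (data : List (List String)), Dom_countY2 data → Spec_countY2 data (countY2 data)

-- ===== LEMMAS AND PROOFS =====

-- Python's "x in item" for a one-character needle is character membership.
theorem isIn_singleton (x : Char) (cs : List Char) :
    PySem.Chars.isIn [x] cs = cs.contains x := by
  by_cases h : x ∈ cs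
  · obtain ⟨s, t, rfl⟩ := List.append_of_mem h
    have : PySem.Chars.isIn [x] (s ++ x :: t) = true := by
      rw [PySem.Chars.isIn_iff_infix]; exact ⟨s, t, by simp⟩
    simp [this, h]
  · have hb : PySem.Chars.isIn [x] cs = false := by
      by_contra hcon
      have hb' : PySem.Chars.isIn [x] cs = true := by
        cases hq : PySem.Chars.isIn [x] cs
        · exact absurd hq hcon
        · rfl
      have hx : x ∈ cs := ((PySem.Chars.isIn_iff_infix [x] cs).mp hb').subset (List.mem_singleton_self x)
      exact h hx
    simp [hb, h]

-- The conditional +1 fold counts the elements satisfying the predicate.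
theorem foldl_count_if {α : Type} (p : α → Bool) (l : List α) (n : Int) :
    l.foldl (fun c item => if p item then c + 1 else c) n = n + ((l.filter p).length : Int) := by
  induction l generalizing n with
  | nil => simp
  | cons a l ih =>
      by_cases h : p a
      · simp only [List.foldl_cons, if_pos h, ih, List.filter_cons_of_pos h, List.length_cons]
        push_cast; ring
      · simp [h, ih]

-- The intersection fold over a group filters the initial set by "every line contains c".
theorem foldl_inter_filter (group : List String) (init : List Char) :
    group.foldl (fun common line => PySem.Set.inter common (PySem.Set.ofList line.toList)) init
      = init.filter (fun c => group.all (fun line => line.toList.contains c)) := by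
  induction group generalizing init with
  | nil => simp
  | cons g rest ih =>
      have hstep : PySem.Set.inter init (PySem.Set.ofList g.toList)
          = init.filter (fun c => g.toList.contains c) := by
        show init.filter (fun x => PySem.Set.contains (PySem.Set.ofList g.toList) x) = _
        apply List.filter_congr
        intro c _
        rw [PySem.Set.contains_eq_listContains]
        simp [PySem.Set.mem_ofList]
      simp only [List.foldl_cons, hstep, ih, List.filter_filter]
      apply List.filter_congr
      intro c _
      simp [Bool.and_comm]

-- A's per-group contribution equals B's per-group contribution, from any accumulator.
theorem step_eq (s : Int) (group : List String) :
    ("abcdefghijklmnopqrstuvwxyz".toList).foldl (fun sum x =>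
        let itemCount : Int := (group.length : Int)
        let itemYcount : Int :=
          group.foldl (fun c item => if PySem.Chars.isIn [x] item.toList then c + 1 else c) 0
        if itemYcount = itemCount then sum + 1 else sum) s
      = s + PySem.Set.len
          (group.foldl (fun common line => PySem.Set.inter common (PySem.Set.ofList line.toList))
            pvABCset) := by
  have habc : (pvABCset : List Char) = "abcdefghijklmnopqrstuvwxyz".toList := by decide
  rw [foldl_inter_filter, habc]
  have hcond : ∀ x : Char,
      (group.foldl (fun c item => if PySem.Chars.isIn [x] item.toList then c + 1 else c) (0 : Int)
          = (group.length : Int))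
        ↔ (group.all (fun line => line.toList.contains x)) = true := by
    intro x
    rw [foldl_count_if (fun item : String => PySem.Chars.isIn [x] item.toList), zero_add,
      Int.natCast_inj, List.length_filter_eq_length_iff, List.all_eq_true]
    simp [isIn_singleton]
  have hfun : (fun (sum : Int) (x : Char) =>
        if group.foldl (fun c item => if PySem.Chars.isIn [x] item.toList then c + 1 else c) (0 : Int)
            = (group.length : Int)
        then sum + 1 else sum)
      = (fun (sum : Int) (x : Char) =>
          if group.all (fun line => line.toList.contains x) then sum + 1 else sum) := by
    funext sum x
    exact if_congr (hcond x) rfl rfl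
  simp only [hfun]
  rw [foldl_count_if (fun c : Char => group.all (fun line => line.toList.contains c))]
  simp [PySem.Set.len]

-- ===== VERDICT (by name: the statement is the Claim_ definition above) =====
theorem countY2_spec : Claim_equal_countY2 := by
  intro data _
  show countY2 data = countY2_alt data
  unfold countY2 countY2_alt
  simp only [step_eq]
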